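-- pv_equiv track=rewrite | github.com/asdfgdhtns/QR-canvas | QR-canvas.py | isDataSpot
-- ===== SOURCE A (Python) =====
-- version = 32
--
-- aPatLoc = [[0],[0],[6,18],[6,22],[6,26],[6,30],[6,34],[6,22,38],[6,24,42],[6,26,46],[6,28,50],[6,30,54],[6,32,58],[6,34,62],[6,26,46,66],[6,26,48,70],[6,26,50,74],[6,30,54,78],[6,30,56,82],[6,30,58,86],[6,34,62,90],[6,28,50,72,94],[6,26,50,74,98],[6,30,54,78,102],[6,28,54,80,106],[6,32,58,84,110],[6,34,62,90,118],[6,30,58,86,114],[6,26,50,74,98,122],[6,30,54,78,102,126],[6,26,52,78,104,130],[6,30,56,82,108,134],[6,34,60,86,112,138],[6,30,58,86,114,142],[6,34,62,90,118,146],[6,30,54,78,102,126,150],[6,24,50,76,102,128,154],[6,28,54,80,106,132,158],[6,32,58,84,110,136,162],[6,26,54,82,110,138,166],[6,30,58,86,114,142,170]]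
--
-- aPatCnt = [0, 0, 2, 2, 2, 2, 3, 3, 3, 3, 3, 3, 3, 4, 4, 4, 4, 4, 4, 4, 5, 5, 5, 5, 5, 5, 5, 6, 6, 6, 6, 6, 6, 6, 7, 7, 7, 7, 7, 7]
--
-- def isDataSpot(x,y): # returns true if pixel x,y in dot array holds message data
--
--     # pixel is off the code
--
--     if x < 0:
--         return False
--     if x >= 17 + version * 4:
--         return False
--     if y < 0:
--         return False
--     if y >= 17 + version * 4:
--         return False
--
--     # Pixel is on a function pattern
--
--     if x == 6 or y == 6: # pixel is on the timing pattern or calibration square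
--         return False
--     if x < 9 and y < 9:   # pixel is on calibration square or format
--         return False
--     if x < 9 and y > (17+4*version) - 9:  # pixel is on calibration square or format
--         return False
--     if x > (17+4*version) - 9 and y < 9:  # pixel is on calibration square of format
--         return False
--     for a in range(aPatCnt[version]):
--         for b in range(aPatCnt[version]):
--             if not ((a == 0 and b == 0) or (a == 0 and b == aPatCnt[version] - 1) or (a == aPatCnt[version] - 1 and b == 0)):
--                 if (x >= aPatLoc[version][a] -2 and x <= aPatLoc[version][a] + 2 and y >= aPatLoc[version][b] - 2 and y <= aPatLoc[version][b] + 2):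
--                     return False # pixel is on a small allignment pattern
--     if version > 6:
--         if y < 6 and x > 5 + version * 4:
--             return False #pixel is on bottom right version block
--         if x < 6 and y > 5 + version * 4:
--             return False #pixel is on bottom right version block
--
--     return True
-- ===== SOURCE B (Python) =====
-- version = 32
--
-- def _align_index(v):
--     # alignment-pattern centers for version 32 are 6 and 34 + 26*k, k = 0..4;
--     # windows are 5 wide and never overlap, so at most one index matches
--     if 4 <= v <= 8:
--         return 0
--     if 32 <= v <= 140 and (v - 32) % 26 <= 4:
--         return 1 + (v - 32) // 26
--     return None
--
-- def isDataSpot(x, y):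
--     size = 17 + version * 4
--     if not (0 <= x < size and 0 <= y < size):
--         return False
--     if x == 6 or y == 6:
--         return False
--     if x < 9 and (y < 9 or y > size - 9):
--         return False
--     if x > size - 9 and y < 9:
--         return False
--     ax = _align_index(x)
--     ay = _align_index(y)
--     if ax is not None and ay is not None and (ax, ay) not in ((0, 0), (0, 5), (5, 0)):
--         return False
--     if y < 6 and x > 5 + version * 4:
--         return False
--     if x < 6 and y > 5 + version * 4:
--         return False
--     return True
-- ===== Notes on version B (the rewrite author's own statement) =====
-- stated objective: simpler
-- what changed: Replaces A's nested double loop over all alignment-pattern index pairs (with table lookups) by a closed arithmetic per-coordinate alignment index (version 32's centers are 6 and 34+26k, so one interval/modulus test per axis) followed by a three-corner index-pair check.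
import Mathlib
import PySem

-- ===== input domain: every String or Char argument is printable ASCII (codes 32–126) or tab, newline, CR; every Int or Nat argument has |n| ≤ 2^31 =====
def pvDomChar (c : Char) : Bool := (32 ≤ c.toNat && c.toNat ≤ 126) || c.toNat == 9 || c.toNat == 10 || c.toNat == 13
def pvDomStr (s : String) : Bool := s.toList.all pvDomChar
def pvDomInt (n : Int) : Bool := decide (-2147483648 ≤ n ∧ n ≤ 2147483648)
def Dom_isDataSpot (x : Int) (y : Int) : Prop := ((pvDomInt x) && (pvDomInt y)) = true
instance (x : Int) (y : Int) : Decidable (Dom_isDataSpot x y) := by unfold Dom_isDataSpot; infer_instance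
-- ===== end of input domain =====

-- B replaces A's nested scan over all alignment-index pairs by a closed arithmetic
-- per-coordinate index (version 32's alignment centers are 6 and 34 + 26*k) plus a
-- corner-pair check; objective: simpler (no table scan, no nested loop).

-- ===== PORT A =====
def pvVersion : Int := 32

def pvAPatLoc : List (List Int) := [[0],[0],[6,18],[6,22],[6,26],[6,30],[6,34],[6,22,38],[6,24,42],[6,26,46],[6,28,50],[6,30,54],[6,32,58],[6,34,62],[6,26,46,66],[6,26,48,70],[6,26,50,74],[6,30,54,78],[6,30,56,82],[6,30,58,86],[6,34,62,90],[6,28,50,72,94],[6,26,50,74,98],[6,30,54,78,102],[6,28,54,80,106],[6,32,58,84,110],[6,34,62,90,118],[6,30,58,86,114],[6,26,50,74,98,122],[6,30,54,78,102,126],[6,26,52,78,104,130],[6,30,56,82,108,134],[6,34,60,86,112,138],[6,30,58,86,114,142],[6,34,62,90,118,146],[6,30,54,78,102,126,150],[6,24,50,76,102,128,154],[6,28,54,80,106,132,158],[6,32,58,84,110,136,162],[6,26,54,82,110,138,166],[6,30,58,86,114,142,170]]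

def pvAPatCnt : List Int := [0, 0, 2, 2, 2, 2, 3, 3, 3, 3, 3, 3, 3, 4, 4, 4, 4, 4, 4, 4, 5, 5, 5, 5, 5, 5, 5, 6, 6, 6, 6, 6, 6, 6, 7, 7, 7, 7, 7, 7]

-- A's nested for-loop over alignment index pairs (the early 'return False' is the 'any')
def pvAlignHit (x : Int) (y : Int) : Bool :=
  let cnt := (PySem.List.pyGet? pvAPatCnt pvVersion).getD 0
  let loc := (PySem.List.pyGet? pvAPatLoc pvVersion).getD []
  (PySem.List.pyRange 0 cnt 1).any (fun a =>
    (PySem.List.pyRange 0 cnt 1).any (fun b =>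
      (!((a == 0 && b == 0) || (a == 0 && b == cnt - 1) || (a == cnt - 1 && b == 0))) &&
      (decide ((PySem.List.pyGet? loc a).getD 0 - 2 ≤ x) &&
       decide (x ≤ (PySem.List.pyGet? loc a).getD 0 + 2) &&
       decide ((PySem.List.pyGet? loc b).getD 0 - 2 ≤ y) &&
       decide (y ≤ (PySem.List.pyGet? loc b).getD 0 + 2))))

def isDataSpot (x : Int) (y : Int) : Bool :=
  if x < 0 then false
  else if x ≥ 17 + pvVersion * 4 then false
  else if y < 0 then false
  else if y ≥ 17 + pvVersion * 4 then false
  else if x == 6 || y == 6 then false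
  else if x < 9 && y < 9 then false
  else if x < 9 && y > (17 + 4 * pvVersion) - 9 then false
  else if x > (17 + 4 * pvVersion) - 9 && y < 9 then false
  else if pvAlignHit x y then false
  else if pvVersion > 6 then
    if y < 6 && x > 5 + pvVersion * 4 then false
    else if x < 6 && y > 5 + pvVersion * 4 then false
    else true
  else true

-- ===== PORT B =====
-- per-coordinate alignment index for version 32: centers 6 and 34 + 26*k (k = 0..4)
def alignIndex (v : Int) : Option Int :=
  if 4 ≤ v ∧ v ≤ 8 then some 0
  else if 32 ≤ v ∧ v ≤ 140 ∧ PySem.Int.mod (v - 32) 26 ≤ 4 then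
    some (1 + PySem.Int.floordiv (v - 32) 26)
  else none

def pvTailChecks (x : Int) (y : Int) : Bool :=
  if y < 6 ∧ x > 133 then false
  else if x < 6 ∧ y > 133 then false
  else true

def isDataSpot_alt (x : Int) (y : Int) : Bool :=
  if ¬ (0 ≤ x ∧ x < 145 ∧ 0 ≤ y ∧ y < 145) then false
  else if x = 6 ∨ y = 6 then false
  else if x < 9 ∧ (y < 9 ∨ y > 136) then false
  else if x > 136 ∧ y < 9 then false
  else
    match alignIndex x, alignIndex y with
    | some ax, some ay =>
        if (ax = 0 ∧ ay = 0) ∨ (ax = 0 ∧ ay = 5) ∨ (ax = 5 ∧ ay = 0) then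
          pvTailChecks x y
        else false
    | _, _ => pvTailChecks x y

-- ===== PRECONDITION & SPEC =====
def Spec_isDataSpot (x : Int) (y : Int) (out : Bool) : Prop := out = isDataSpot_alt x y
instance (x : Int) (y : Int) (out : Bool) : Decidable (Spec_isDataSpot x y out) := by unfold Spec_isDataSpot; infer_instance

-- ===== CLAIM =====
def Claim_equal_isDataSpot : Prop := ∀ (x : Int) (y : Int), Dom_isDataSpot x y → Spec_isDataSpot x y (isDataSpot x y)

-- ===== LEMMAS AND PROOFS =====
theorem pvCnt_eq : (PySem.List.pyGet? pvAPatCnt pvVersion).getD 0 = 6 := by decide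
theorem pvLoc_eq : (PySem.List.pyGet? pvAPatLoc pvVersion).getD [] = [6, 34, 60, 86, 112, 138] := by decide
theorem pvRange6 : PySem.List.pyRange 0 6 1 = [0, 1, 2, 3, 4, 5] := by decide

-- the window [center-2, center+2] of index a matches v exactly when alignIndex v = some a
theorem pvWin_iff (v a : Int) (h0 : 0 ≤ a) (h5 : a ≤ 5) :
    ((PySem.List.pyGet? [6, 34, 60, 86, 112, 138] a).getD 0 - 2 ≤ v ∧
     v ≤ (PySem.List.pyGet? [6, 34, 60, 86, 112, 138] a).getD 0 + 2) ↔ alignIndex v = some a := by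
  have hmod : PySem.Int.mod (v - 32) 26 = (v - 32) % 26 :=
    PySem.Int.mod_eq_emod_of_pos (by norm_num)
  have hdiv : PySem.Int.floordiv (v - 32) 26 = (v - 32) / 26 :=
    PySem.Int.floordiv_eq_ediv_of_pos (by norm_num)
  unfold alignIndex
  rw [hmod, hdiv]
  interval_cases a <;> split_ifs <;> simp [PySem.List.pyGet?, PySem.List.pyIdx?] <;> omega

theorem pvAlign_bounds (v a : Int) (h : alignIndex v = some a) : 0 ≤ a ∧ a ≤ 5 := by
  have hmod : PySem.Int.mod (v - 32) 26 = (v - 32) % 26 :=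
    PySem.Int.mod_eq_emod_of_pos (by norm_num)
  have hdiv : PySem.Int.floordiv (v - 32) 26 = (v - 32) / 26 :=
    PySem.Int.floordiv_eq_ediv_of_pos (by norm_num)
  unfold alignIndex at h
  rw [hmod, hdiv] at h
  split_ifs at h <;> simp_all <;> omega

theorem pvHit_eq (x y : Int) :
    pvAlignHit x y =
      (match alignIndex x, alignIndex y with
       | some a, some b => !((a == 0 && b == 0) || (a == 0 && b == 5) || (a == 5 && b == 0))
       | _, _ => false) := by
  unfold pvAlignHit
  simp only [pvCnt_eq, pvLoc_eq, pvRange6, show (6:Int) - 1 = 5 by norm_num]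
  rcases hx : alignIndex x with _ | a <;> rcases hy : alignIndex y with _ | b
  · -- no window matches x
    change _ = false
    simp only [List.any_eq_false]
    intro a ha
    rw [List.any_eq_true]
    rintro ⟨b, hb, hg⟩
    simp only [Bool.and_eq_true, decide_eq_true_eq] at hg
    obtain ⟨-, ⟨⟨h1, h2⟩, -⟩, -⟩ := hg
    have ha' : 0 ≤ a ∧ a ≤ 5 := by simp at ha; omega
    have := (pvWin_iff x a ha'.1 ha'.2).mp ⟨h1, h2⟩
    rw [hx] at this; exact absurd this (by simp)
  · change _ = false
    simp only [List.any_eq_false]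
    intro a ha
    rw [List.any_eq_true]
    rintro ⟨b', hb', hg⟩
    simp only [Bool.and_eq_true, decide_eq_true_eq] at hg
    obtain ⟨-, ⟨⟨h1, h2⟩, -⟩, -⟩ := hg
    have ha' : 0 ≤ a ∧ a ≤ 5 := by simp at ha; omega
    have := (pvWin_iff x a ha'.1 ha'.2).mp ⟨h1, h2⟩
    rw [hx] at this; exact absurd this (by simp)
  · -- no window matches y
    change _ = false
    simp only [List.any_eq_false]
    intro a' ha'
    rw [List.any_eq_true]
    rintro ⟨b, hb, hg⟩
    simp only [Bool.and_eq_true, decide_eq_true_eq] at hg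
    obtain ⟨-, ⟨-, h3⟩, h4⟩ := hg
    have hb' : 0 ≤ b ∧ b ≤ 5 := by simp at hb; omega
    have := (pvWin_iff y b hb'.1 hb'.2).mp ⟨h3, h4⟩
    rw [hy] at this; exact absurd this (by simp)
  · -- both match: exactly the pair (a, b) fires
    have ha5 := pvAlign_bounds x a hx
    have hb5 := pvAlign_bounds y b hy
    by_cases hc : (a = 0 ∧ b = 0) ∨ (a = 0 ∧ b = 5) ∨ (a = 5 ∧ b = 0)
    · have hrhs : (!((a == 0 && b == 0) || (a == 0 && b == 5) || (a == 5 && b == 0))) = false := by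
        rcases hc with ⟨h1, h2⟩ | ⟨h1, h2⟩ | ⟨h1, h2⟩ <;> subst h1 <;> subst h2 <;> simp
      change _ = (!((a == 0 && b == 0) || (a == 0 && b == 5) || (a == 5 && b == 0)))
      rw [hrhs]
      simp only [List.any_eq_false]
      intro a' ha'
      rw [List.any_eq_true]
      rintro ⟨b', hb', hg⟩
      simp only [Bool.and_eq_true, decide_eq_true_eq] at hg
      obtain ⟨hnc, ⟨⟨h1, h2⟩, h3⟩, h4⟩ := hg
      have haa : 0 ≤ a' ∧ a' ≤ 5 := by simp at ha'; omega
      have hbb : 0 ≤ b' ∧ b' ≤ 5 := by simp at hb'; omega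
      have ea := (pvWin_iff x a' haa.1 haa.2).mp ⟨h1, h2⟩
      have eb := (pvWin_iff y b' hbb.1 hbb.2).mp ⟨h3, h4⟩
      rw [hx] at ea; rw [hy] at eb
      have ea' : a' = a := by simpa using ea.symm
      have eb' : b' = b := by simpa using eb.symm
      subst ea'; subst eb'
      rcases hc with ⟨h1', h2'⟩ | ⟨h1', h2'⟩ | ⟨h1', h2'⟩ <;> subst h1' <;> subst h2' <;> simp at hnc
    · have hrhs : (!((a == 0 && b == 0) || (a == 0 && b == 5) || (a == 5 && b == 0))) = true := by
        simp only [Bool.not_eq_true', Bool.or_eq_false_iff, Bool.and_eq_false_iff,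
          beq_eq_false_iff_ne, ne_eq]
        push Not at hc
        omega
      change _ = (!((a == 0 && b == 0) || (a == 0 && b == 5) || (a == 5 && b == 0)))
      rw [hrhs]
      rw [List.any_eq_true]
      refine ⟨a, by simp; omega, ?_⟩
      rw [List.any_eq_true]
      refine ⟨b, by simp; omega, ?_⟩
      rw [Bool.and_eq_true]
      refine ⟨hrhs, ?_⟩
      simp only [Bool.and_eq_true, decide_eq_true_eq]
      have ea := (pvWin_iff x a ha5.1 ha5.2).mpr hx
      have eb := (pvWin_iff y b hb5.1 hb5.2).mpr hy
      exact ⟨⟨⟨ea.1, ea.2⟩, eb.1⟩, eb.2⟩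

-- ===== VERDICT =====
theorem isDataSpot_spec : Claim_equal_isDataSpot := by
  intro x y _
  unfold Spec_isDataSpot
  by_cases hr : 0 ≤ x ∧ x < 145 ∧ 0 ≤ y ∧ y < 145
  · unfold isDataSpot isDataSpot_alt pvVersion pvTailChecks
    rw [pvHit_eq]
    rcases alignIndex x with _ | a <;> rcases alignIndex y with _ | b <;>
      · norm_num
        rw [Bool.eq_iff_iff]
        simp only [Bool.and_eq_true, Bool.or_eq_true, Bool.not_eq_true',
          decide_eq_false_iff_not, decide_eq_true_eq]
        omega
  · have hA : isDataSpot x y = false := by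
      unfold isDataSpot pvVersion
      push Not at hr
      norm_num
      intros
      omega
    have hB : isDataSpot_alt x y = false := by
      unfold isDataSpot_alt
      rw [if_pos hr]
    rw [hA, hB]
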